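-- pv_equiv track=rewrite | github.com/shwejan005/grant-agent-system | agents/budget_agent.py | parse_budget_output
-- ===== SOURCE A (Python) =====
-- def parse_budget_output(raw_output: str) -> dict:
--     """Parse the budget agent output into structured components."""
--     budget = {
--         "budget_table": "",
--         "milestone_schedule": "",
--         "cost_justification": "",
--     }
--
--     lines = raw_output.split("\n")
--     current_section = None
--
--     budget_markers = ["budget table", "budget breakdown", "budget"]
--     milestone_markers = ["milestone schedule", "milestone timeline", "milestone", "timeline"]
--     justification_markers = ["cost justification", "justification", "budget justification"]
--
--     for line in lines:
--         line_lower = line.strip().lower().rstrip(":")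
--         clean = line_lower.lstrip("#").strip().lstrip("*").rstrip("*").strip()
--
--         if any(clean == m or clean.startswith(m) for m in justification_markers):
--             current_section = "cost_justification"
--             continue
--         elif any(clean == m or clean.startswith(m) for m in milestone_markers):
--             current_section = "milestone_schedule"
--             continue
--         elif any(clean == m or clean.startswith(m) for m in budget_markers):
--             current_section = "budget_table"
--             continue
--
--         if current_section:
--             budget[current_section] += line + "\n"
--
--     for key in budget:
--         budget[key] = budget[key].strip()
--
--     # Fallback: if nothing was parsed, put everything in budget_table
--     if not any(budget.values()):
--         budget["budget_table"] = raw_output.strip()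
--
--     return budget
-- ===== SOURCE B (Python) =====
-- _BUDGET_MARKERS = ["budget table", "budget breakdown", "budget"]
-- _MILESTONE_MARKERS = ["milestone schedule", "milestone timeline", "milestone", "timeline"]
-- _JUSTIFICATION_MARKERS = ["cost justification", "justification", "budget justification"]
--
--
-- def _classify(line: str):
--     """Return the section name if the line is a header, else None."""
--     clean = (
--         line.strip().lower().rstrip(":").lstrip("#").strip().lstrip("*").rstrip("*").strip()
--     )
--     for name, markers in (
--         ("cost_justification", _JUSTIFICATION_MARKERS),
--         ("milestone_schedule", _MILESTONE_MARKERS),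
--         ("budget_table", _BUDGET_MARKERS),
--     ):
--         if any(clean == m or clean.startswith(m) for m in markers):
--             return name
--     return None
--
--
-- def parse_budget_output(raw_output: str) -> dict:
--     """Parse the budget agent output into structured components."""
--     # Pass 1: segment the document into (section_name, [body lines]) blocks.
--     segments = []
--     for line in raw_output.split("\n"):
--         name = _classify(line)
--         if name is not None:
--             segments.append((name, []))
--         elif segments:
--             segments[-1][1].append(line)
--
--     # Pass 2: gather the blocks of each section in document order.
--     bt, ms, cj = [], [], []
--     for name, block in segments:
--         if name == "budget_table":
--             bt += block
--         elif name == "milestone_schedule":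
--             ms += block
--         else:
--             cj += block
--
--     budget = {
--         "budget_table": "\n".join(bt).strip(),
--         "milestone_schedule": "\n".join(ms).strip(),
--         "cost_justification": "\n".join(cj).strip(),
--     }
--     if not any(budget.values()):
--         budget["budget_table"] = raw_output.strip()
--     return budget
-- ===== Notes on version B (the rewrite author's own statement) =====
-- stated objective: alternative
-- what changed: A keeps a current-section marker and appends each body line (plus newline) into a dict of growing strings in one pass; B first segments the document into a list of (section, block-of-lines) segments, then gathers each section's blocks in document order and joins them once per section, with the same normalization, marker precedence and all-empty fallback.
import Mathlib
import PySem

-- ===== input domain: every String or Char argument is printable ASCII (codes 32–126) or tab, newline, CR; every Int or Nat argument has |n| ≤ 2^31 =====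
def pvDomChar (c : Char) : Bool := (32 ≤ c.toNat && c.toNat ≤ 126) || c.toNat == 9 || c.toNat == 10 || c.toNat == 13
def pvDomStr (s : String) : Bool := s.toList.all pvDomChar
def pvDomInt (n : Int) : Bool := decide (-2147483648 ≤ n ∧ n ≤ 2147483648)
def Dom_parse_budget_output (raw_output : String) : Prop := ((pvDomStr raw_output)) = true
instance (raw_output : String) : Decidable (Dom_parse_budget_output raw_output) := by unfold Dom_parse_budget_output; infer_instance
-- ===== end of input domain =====

-- B replaces A's single pass carrying a current-section string and three growing strings by a
-- segmentation pass building a list of (section, block-of-lines) segments, a gathering pass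
-- concatenating each section's blocks, and one join per section (objective: alternative decomposition).

-- shared data / normalization helpers (identical text in both Python versions)
-- Python str.lstrip(chars)/rstrip(chars) with an explicit character set, ported by hand
-- (exact: drops leading / trailing characters belonging to the set)
def pvLstripSet (set : List Char) (s : List Char) : List Char :=
  s.dropWhile (fun c => set.contains c)

def pvRstripSet (set : List Char) (s : List Char) : List Char :=
  (s.reverse.dropWhile (fun c => set.contains c)).reverse

-- line.strip().lower().rstrip(":").lstrip("#").strip().lstrip("*").rstrip("*").strip()
def pvCleanLine (line : List Char) : List Char :=
  let line_lower := pvRstripSet [':'] (PySem.Chars.lower (PySem.Chars.strip line))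
  PySem.Chars.strip (pvRstripSet ['*'] (pvLstripSet ['*'] (PySem.Chars.strip (pvLstripSet ['#'] line_lower))))

def pvBudgetMarkers : List (List Char) :=
  ["budget table".toList, "budget breakdown".toList, "budget".toList]
def pvMilestoneMarkers : List (List Char) :=
  ["milestone schedule".toList, "milestone timeline".toList, "milestone".toList, "timeline".toList]
def pvJustificationMarkers : List (List Char) :=
  ["cost justification".toList, "justification".toList, "budget justification".toList]

-- any(clean == m or clean.startswith(m) for m in markers)
def pvIsHdr (markers : List (List Char)) (clean : List Char) : Bool :=
  markers.any (fun m => clean == m || PySem.Chars.startswith clean m)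

-- ===== PORT A =====
-- A's dict has the three fixed keys "budget_table"/"milestone_schedule"/"cost_justification"
-- in that insertion order throughout; it is represented as a triple of accumulated strings
-- (as List Char), returned as the association list in that key order.
def pvStepA (st : Option String × List Char × List Char × List Char) (line : List Char) :
    Option String × List Char × List Char × List Char :=
  if pvIsHdr pvJustificationMarkers (pvCleanLine line) then (some "cost_justification", st.2)
  else if pvIsHdr pvMilestoneMarkers (pvCleanLine line) then (some "milestone_schedule", st.2)
  else if pvIsHdr pvBudgetMarkers (pvCleanLine line) then (some "budget_table", st.2)
  else
    match st.1 with
    | some s =>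
        -- budget[current_section] += line + "\n"  (current_section is always one of the three keys)
        if s == "budget_table" then (st.1, st.2.1 ++ line ++ ['\n'], st.2.2.1, st.2.2.2)
        else if s == "milestone_schedule" then (st.1, st.2.1, st.2.2.1 ++ line ++ ['\n'], st.2.2.2)
        else (st.1, st.2.1, st.2.2.1, st.2.2.2 ++ line ++ ['\n'])
    | none => st

def parse_budget_output (raw_output : String) : List (String × String) :=
  let lines := PySem.Chars.splitOn raw_output.toList ['\n']
  let st := lines.foldl pvStepA (none, [], [], [])
  let bt := PySem.Chars.strip st.2.1
  let ms := PySem.Chars.strip st.2.2.1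
  let cj := PySem.Chars.strip st.2.2.2
  -- fallback: if nothing was parsed, put everything in budget_table
  let bt := if bt.isEmpty && ms.isEmpty && cj.isEmpty then PySem.Chars.strip raw_output.toList else bt
  [("budget_table", String.ofList bt), ("milestone_schedule", String.ofList ms), ("cost_justification", String.ofList cj)]

-- ===== PORT B =====
-- Source B's _classify: header section name, or none
def pvClassify (line : List Char) : Option String :=
  if pvIsHdr pvJustificationMarkers (pvCleanLine line) then some "cost_justification"
  else if pvIsHdr pvMilestoneMarkers (pvCleanLine line) then some "milestone_schedule"
  else if pvIsHdr pvBudgetMarkers (pvCleanLine line) then some "budget_table"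
  else none

-- pass 1 step: start a new segment on a header line, else append to the last segment (if any)
def pvSegStep (segs : List (String × List (List Char))) (line : List Char) :
    List (String × List (List Char)) :=
  match pvClassify line with
  | some name => segs ++ [(name, [])]
  | none =>
      match segs.getLast? with
      | some (n, b) => segs.dropLast ++ [(n, b ++ [line])]
      | none => segs

-- pass 2 step: route each segment's block to its section's line list
def pvGather (acc : List (List Char) × List (List Char) × List (List Char))
    (seg : String × List (List Char)) :
    List (List Char) × List (List Char) × List (List Char) :=
  if seg.1 == "budget_table" then (acc.1 ++ seg.2, acc.2.1, acc.2.2)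
  else if seg.1 == "milestone_schedule" then (acc.1, acc.2.1 ++ seg.2, acc.2.2)
  else (acc.1, acc.2.1, acc.2.2 ++ seg.2)

def parse_budget_output_alt (raw_output : String) : List (String × String) :=
  let segments := (PySem.Chars.splitOn raw_output.toList ['\n']).foldl pvSegStep []
  let g := segments.foldl pvGather ([], [], [])
  let bt := PySem.Chars.strip (PySem.Chars.join ['\n'] g.1)
  let ms := PySem.Chars.strip (PySem.Chars.join ['\n'] g.2.1)
  let cj := PySem.Chars.strip (PySem.Chars.join ['\n'] g.2.2)
  let bt := if bt.isEmpty && ms.isEmpty && cj.isEmpty then PySem.Chars.strip raw_output.toList else bt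
  [("budget_table", String.ofList bt), ("milestone_schedule", String.ofList ms), ("cost_justification", String.ofList cj)]

-- ===== PRECONDITION & SPEC =====
def Spec_parse_budget_output (raw_output : String) (out : List (String × String)) : Prop := out = parse_budget_output_alt raw_output
instance (raw_output : String) (out : List (String × String)) : Decidable (Spec_parse_budget_output raw_output out) := by unfold Spec_parse_budget_output; infer_instance

-- ===== CLAIM (what is proved, stated in full; the proofs are below) =====
def Claim_equal_parse_budget_output : Prop := ∀ (raw_output : String), Dom_parse_budget_output raw_output → Spec_parse_budget_output raw_output (parse_budget_output raw_output)

-- ===== LEMMAS AND PROOFS =====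

-- A's accumulated string for one section: every collected line followed by '\n'
def pvJ (L : List (List Char)) : List Char := (L.map (· ++ ['\n'])).flatten

-- A's loop state as a function of B's segment list
def pvStOf (segs : List (String × List (List Char))) :
    Option String × List Char × List Char × List Char :=
  let g := segs.foldl pvGather ([], [], [])
  ((segs.getLast?).map (·.1), pvJ g.1, pvJ g.2.1, pvJ g.2.2)

-- a segment list whose section names are the three dict keys
def pvGood (segs : List (String × List (List Char))) : Prop :=
  ∀ p ∈ segs, p.1 = "budget_table" ∨ p.1 = "milestone_schedule" ∨ p.1 = "cost_justification"

theorem pvGood_step (segs : List (String × List (List Char))) (line : List Char)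
    (h : pvGood segs) : pvGood (pvSegStep segs line) := by
  unfold pvSegStep pvClassify
  split_ifs with h1 h2 h3 <;> simp only []
  · intro p hp
    rcases List.mem_append.1 hp with hp | hp
    · exact h p hp
    · simp at hp; simp [hp]
  · intro p hp
    rcases List.mem_append.1 hp with hp | hp
    · exact h p hp
    · simp at hp; simp [hp]
  · intro p hp
    rcases List.mem_append.1 hp with hp | hp
    · exact h p hp
    · simp at hp; simp [hp]
  · cases hl : segs.getLast? with
    | none => exact h
    | some q =>
        obtain ⟨n, b⟩ := q
        obtain ⟨init, hinit⟩ := List.getLast?_eq_some_iff.1 hl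
        subst hinit
        intro p hp
        rw [List.dropLast_concat] at hp
        rcases List.mem_append.1 hp with hp | hp
        · exact h p (List.mem_append.2 (Or.inl hp))
        · simp at hp
          have := h (n, b) (List.mem_append.2 (Or.inr (by simp)))
          simpa [hp] using this

theorem pvStep_eq (segs : List (String × List (List Char))) (line : List Char)
    (h : pvGood segs) : pvStepA (pvStOf segs) line = pvStOf (pvSegStep segs line) := by
  unfold pvStepA pvSegStep pvClassify
  split_ifs with h1 h2 h3 <;> simp only []
  · -- justification header
    simp [pvStOf, pvGather]
  · -- milestone header
    simp [pvStOf, pvGather]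
  · -- budget header
    simp [pvStOf, pvGather]
  · -- body line
    cases hl : segs.getLast? with
    | none =>
        have : segs = [] := List.getLast?_eq_none_iff.1 hl
        subst this
        simp [pvStOf]
    | some q =>
        obtain ⟨n, b⟩ := q
        obtain ⟨init, hinit⟩ := List.getLast?_eq_some_iff.1 hl
        subst hinit
        have hn := h (n, b) (List.mem_append.2 (Or.inr (by simp)))
        simp only [List.dropLast_concat]
        rcases hn with hn | hn | hn <;> subst hn <;>
          simp [pvStOf, pvGather, pvJ]

theorem pvFoldl_eq (lines : List (List Char)) :
    ∀ segs, pvGood segs →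
      lines.foldl pvStepA (pvStOf segs) = pvStOf (lines.foldl pvSegStep segs) := by
  induction lines with
  | nil => intro segs _; rfl
  | cons line rest ih =>
      intro segs h
      simp only [List.foldl_cons]
      rw [pvStep_eq segs line h]
      exact ih _ (pvGood_step segs line h)

theorem pvJ_eq_join (L : List (List Char)) :
    pvJ L = if L.isEmpty then [] else PySem.Chars.join ['\n'] L ++ ['\n'] := by
  induction L with
  | nil => simp [pvJ]
  | cons x t ih =>
      cases t with
      | nil => simp [pvJ, PySem.Chars.join_singleton]
      | cons y t' =>
          rw [if_neg (by simp)] at ih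
          rw [if_neg (by simp)]
          have hx : pvJ (x :: y :: t') = x ++ ['\n'] ++ pvJ (y :: t') := by simp [pvJ]
          rw [hx, ih, PySem.Chars.join_cons_cons]
          simp

theorem pvRstrip_newline (cs : List Char) :
    PySem.Chars.rstrip (cs ++ ['\n']) = PySem.Chars.rstrip cs := by
  simp [PySem.Chars.rstrip, show PySem.Chars.isspace '\n' = true from rfl]

theorem pvStrip_newline (cs : List Char) :
    PySem.Chars.strip (cs ++ ['\n']) = PySem.Chars.strip cs := by
  unfold PySem.Chars.strip PySem.Chars.lstrip
  rw [List.dropWhile_append]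
  by_cases h : (cs.dropWhile PySem.Chars.isspace).isEmpty
  · rw [if_pos h]
    rw [List.isEmpty_iff] at h
    rw [h]
    simp [PySem.Chars.rstrip, show PySem.Chars.isspace '\n' = true from rfl]
  · rw [if_neg h]
    exact pvRstrip_newline _

theorem pvStrip_pvJ (L : List (List Char)) :
    PySem.Chars.strip (pvJ L) = PySem.Chars.strip (PySem.Chars.join ['\n'] L) := by
  rw [pvJ_eq_join]
  cases L with
  | nil => simp
  | cons x t => simpa using pvStrip_newline (PySem.Chars.join ['\n'] (x :: t))

-- ===== VERDICT (by name: the statement is the Claim_ definition above) =====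
theorem parse_budget_output_spec : Claim_equal_parse_budget_output := by
  intro raw _
  unfold Spec_parse_budget_output parse_budget_output parse_budget_output_alt
  have hfold := pvFoldl_eq (PySem.Chars.splitOn raw.toList ['\n']) [] (by intro p hp; cases hp)
  have h0 : pvStOf [] = (none, [], [], []) := rfl
  rw [h0] at hfold
  simp only [hfold, pvStOf, pvStrip_pvJ]
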